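-- pv_equiv track=rewrite | github.com/bayoishola20/HashCode | practice_round/ReadInputHandler.py | calculate
-- ===== SOURCE A (Python) =====
-- def calculate(max_required, types_available, slices_in_pizza, direction, window):
--
--     kernel = 0
--     all_combinations = []
--     deficit = []
--     optimized = None
--
--     if direction == "backward":
--         if window == "backward":
--             for i in range(types_available - 1, -1, -1):
--                 pizza_needed = max_required
--                 order_pizza = []
--
--                 for j in range((types_available - 1 - kernel), -1, -1):
--                     if pizza_needed - slices_in_pizza[j] >= 0:
--                         order_pizza.append(j)
--                         pizza_needed -= slices_in_pizza[j]
--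
--                 deficit.append(pizza_needed)
--                 all_combinations.append(order_pizza)
--                 kernel += 1
--
--         else:
--             for i in range(types_available - 1, -1, -1):
--                 pizza_needed = max_required
--                 order_pizza = []
--
--                 for j in range((types_available - kernel)):
--                     if pizza_needed - slices_in_pizza[j] >= 0:
--                         order_pizza.append(j)
--                         pizza_needed -= slices_in_pizza[j]
--
--                 deficit.append(pizza_needed)
--                 all_combinations.append(order_pizza)
--                 kernel += 1
--     else:
--         if window == "backward":
--             for i in range(types_available):
--                 pizza_needed = max_required
--                 order_pizza = []
--
--                 for j in range((types_available - 1 - kernel), -1, -1):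
--                     if pizza_needed - slices_in_pizza[j] >= 0:
--                         order_pizza.append(j)
--                         pizza_needed -= slices_in_pizza[j]
--
--                 deficit.append(pizza_needed)
--                 all_combinations.append(order_pizza)
--                 kernel += 1
--
--         else:
--             for i in range(types_available):
--                 pizza_needed = max_required
--                 order_pizza = []
--
--                 for j in range((types_available - kernel)):
--                     if pizza_needed - slices_in_pizza[j] >= 0:
--                         order_pizza.append(j)
--                         pizza_needed -= slices_in_pizza[j]
--
--                 deficit.append(pizza_needed)
--                 all_combinations.append(order_pizza)
--                 kernel += 1
--
--     optimized = deficit.index(min(deficit))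
--     optimized = all_combinations[optimized]
--
--     optimized.reverse()
--
--     # return (1, 2, 1)
--
--     return (len(optimized), optimized, min(deficit))
-- ===== SOURCE B (Python) =====
-- def calculate(max_required, types_available, slices_in_pizza, direction, window):
--     # direction only changes an unused loop variable; both values iterate
--     # types_available times, so it is ignored here.
--     n = types_available
--
--     if window == "backward":
--         # deficit of kernel k: greedy scan from index n-1-k down to 0
--         def deficit_of(k):
--             need = max_required
--             for j in range(n - 1 - k, -1, -1):
--                 if need >= slices_in_pizza[j]:
--                     need -= slices_in_pizza[j]
--             return need
--         deficits = [deficit_of(k) for k in range(n)]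
--     else:
--         # one accumulating left-to-right scan: prefix_def[t] is the deficit
--         # after greedily consuming indices 0..t-1; kernel k uses prefix n-k
--         prefix_def = [max_required]
--         need = max_required
--         for x in slices_in_pizza[:n]:
--             if need >= x:
--                 need -= x
--             prefix_def.append(need)
--         deficits = [prefix_def[n - k] for k in range(n)]
--
--     best = min(deficits)
--     k = deficits.index(best)
--
--     # reconstruct only the winning combination
--     combo = []
--     need = max_required
--     rng = range(n - 1 - k, -1, -1) if window == "backward" else range(n - k)
--     for j in rng:
--         if need >= slices_in_pizza[j]:
--             combo.append(j)
--             need -= slices_in_pizza[j]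
--     combo.reverse()
--     return (len(combo), combo, best)
-- ===== Notes on version B (the rewrite author's own statement) =====
-- stated objective: faster
-- what changed: B drops the direction branch (its loop variable is unused and both directions iterate the same number of times), never builds the list of all combinations, computes only the per-kernel deficit list (via a single accumulating prefix scan for the forward window instead of rescanning each prefix), and reconstructs just the winning combination once at the end.
import Mathlib
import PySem

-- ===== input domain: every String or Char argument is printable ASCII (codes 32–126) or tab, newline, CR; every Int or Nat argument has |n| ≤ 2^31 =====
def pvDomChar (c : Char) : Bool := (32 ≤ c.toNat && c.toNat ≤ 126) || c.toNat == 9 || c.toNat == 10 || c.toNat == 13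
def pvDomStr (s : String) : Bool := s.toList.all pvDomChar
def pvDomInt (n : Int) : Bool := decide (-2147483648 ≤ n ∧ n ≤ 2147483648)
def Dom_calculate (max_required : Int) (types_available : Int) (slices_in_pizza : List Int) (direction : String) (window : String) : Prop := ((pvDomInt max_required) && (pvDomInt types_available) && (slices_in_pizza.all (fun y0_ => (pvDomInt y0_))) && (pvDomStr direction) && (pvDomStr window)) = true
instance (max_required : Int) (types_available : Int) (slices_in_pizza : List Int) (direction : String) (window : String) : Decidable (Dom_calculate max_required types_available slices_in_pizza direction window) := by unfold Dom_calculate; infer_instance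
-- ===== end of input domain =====

-- B replaces A's quadratic build-all-combinations pass by computing only the deficit per
-- kernel (one accumulating prefix scan for the forward window) and reconstructing the single
-- winning combination afterwards; equal return values on all inputs admitted by Pre_.

-- ===== PORT A =====
-- Literal transliteration of A.  Pre_calculate guarantees 1 ≤ types_available ≤ |slices|,
-- so the pyGetD/getD defaults below are never reached (Python raises exactly outside Pre_).
def calculate (max_required : Int) (types_available : Int) (slices_in_pizza : List Int) (direction : String) (window : String) : Int × List Int × Int :=
  -- inner loop 'for j in range(types_available - 1 - kernel, -1, -1)'
  let stepB : (Int × List (List Int) × List Int) → Int → (Int × List (List Int) × List Int) := fun st _ =>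
    let r := (PySem.List.pyRange (types_available - 1 - st.1) (-1) (-1)).foldl
      (fun (p : Int × List Int) j =>
        if p.1 - PySem.List.pyGetD slices_in_pizza j 0 ≥ 0 then
          (p.1 - PySem.List.pyGetD slices_in_pizza j 0, p.2 ++ [j])
        else p) (max_required, [])
    (st.1 + 1, st.2.1 ++ [r.2], st.2.2 ++ [r.1])
  -- inner loop 'for j in range(types_available - kernel)'
  let stepF : (Int × List (List Int) × List Int) → Int → (Int × List (List Int) × List Int) := fun st _ =>
    let r := (PySem.List.pyRange 0 (types_available - st.1) 1).foldl
      (fun (p : Int × List Int) j =>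
        if p.1 - PySem.List.pyGetD slices_in_pizza j 0 ≥ 0 then
          (p.1 - PySem.List.pyGetD slices_in_pizza j 0, p.2 ++ [j])
        else p) (max_required, [])
    (st.1 + 1, st.2.1 ++ [r.2], st.2.2 ++ [r.1])
  let st :=
    if direction == "backward" then
      if window == "backward" then
        (PySem.List.pyRange (types_available - 1) (-1) (-1)).foldl stepB (0, [], [])
      else
        (PySem.List.pyRange (types_available - 1) (-1) (-1)).foldl stepF (0, [], [])
    else
      if window == "backward" then
        (PySem.List.pyRange 0 types_available 1).foldl stepB (0, [], [])
      else
        (PySem.List.pyRange 0 types_available 1).foldl stepF (0, [], [])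
  let deficit := st.2.2
  let m := (PySem.List.min? deficit (fun x => x)).getD 0
  let idx := (PySem.List.index? deficit m).getD 0
  let optimized := (PySem.List.pyGetD st.2.1 (idx : Int) []).reverse
  ((optimized.length : Int), optimized, m)

-- ===== PORT B =====
-- literal transliteration of Source B
def calculate_alt (max_required : Int) (types_available : Int) (slices_in_pizza : List Int) (direction : String) (window : String) : Int × List Int × Int :=
  let n := types_available
  let deficits :=
    if window == "backward" then
      (PySem.List.pyRange 0 n 1).map (fun k =>
        (PySem.List.pyRange (n - 1 - k) (-1) (-1)).foldl
          (fun need j =>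
            if need ≥ PySem.List.pyGetD slices_in_pizza j 0 then
              need - PySem.List.pyGetD slices_in_pizza j 0
            else need) max_required)
    else
      let pd := (PySem.List.slice slices_in_pizza none (some n)).foldl
        (fun (st : List Int × Int) x =>
          let nd := if st.2 ≥ x then st.2 - x else st.2
          (st.1 ++ [nd], nd)) ([max_required], max_required)
      (PySem.List.pyRange 0 n 1).map (fun k => PySem.List.pyGetD pd.1 (n - k) 0)
  let best := (PySem.List.min? deficits (fun x => x)).getD 0
  let k := (PySem.List.index? deficits best).getD 0
  let rng := if window == "backward" then PySem.List.pyRange (n - 1 - (k : Int)) (-1) (-1)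
             else PySem.List.pyRange 0 (n - (k : Int)) 1
  let combo := (rng.foldl
      (fun (p : Int × List Int) j =>
        if p.1 ≥ PySem.List.pyGetD slices_in_pizza j 0 then
          (p.1 - PySem.List.pyGetD slices_in_pizza j 0, p.2 ++ [j])
        else p) (max_required, [])).2.reverse
  ((combo.length : Int), combo, best)

-- ===== PRECONDITION & SPEC =====
-- Exactly the inputs on which Python A returns: outside it A raises (ValueError from min([])
-- when types_available < 1, IndexError when types_available exceeds the list length).
def Pre_calculate (max_required : Int) (types_available : Int) (slices_in_pizza : List Int) (direction : String) (window : String) : Prop :=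
  1 ≤ types_available ∧ types_available ≤ (slices_in_pizza.length : Int)
instance (max_required : Int) (types_available : Int) (slices_in_pizza : List Int) (direction : String) (window : String) : Decidable (Pre_calculate max_required types_available slices_in_pizza direction window) := by unfold Pre_calculate; infer_instance
def pvWitness_calculate : Int × Int × List Int × String × String := (10, 2, [3, 4], "forward", "forward")

def Spec_calculate (max_required : Int) (types_available : Int) (slices_in_pizza : List Int) (direction : String) (window : String) (out : Int × List Int × Int) : Prop := out = calculate_alt max_required types_available slices_in_pizza direction window
instance (max_required : Int) (types_available : Int) (slices_in_pizza : List Int) (direction : String) (window : String) (out : Int × List Int × Int) : Decidable (Spec_calculate max_required types_available slices_in_pizza direction window out) := by unfold Spec_calculate; infer_instance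

-- ===== CLAIM (what is proved, stated in full; the proofs are below) =====
def Claim_equal_calculate : Prop := ∀ (max_required : Int) (types_available : Int) (slices_in_pizza : List Int) (direction : String) (window : String), Dom_calculate max_required types_available slices_in_pizza direction window → Pre_calculate max_required types_available slices_in_pizza direction window → Spec_calculate max_required types_available slices_in_pizza direction window (calculate max_required types_available slices_in_pizza direction window)


-- ===== LEMMAS AND PROOFS =====

-- B's greedy value step / need-only fold over values
def pvNeedVal (a : Int) (l : List Int) : Int :=
  l.foldl (fun nd x => if nd ≥ x then nd - x else nd) a
-- need-only fold over a list of indices into s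
def pvNeedIdx (s : List Int) (a : Int) (rng : List Int) : Int :=
  rng.foldl (fun nd j => if nd ≥ PySem.List.pyGetD s j 0 then nd - PySem.List.pyGetD s j 0 else nd) a
-- B's pair fold (need, picked indices) over a list of indices
def pvPairB (s : List Int) (a : Int) (rng : List Int) : Int × List Int :=
  rng.foldl (fun (p : Int × List Int) j =>
    if p.1 ≥ PySem.List.pyGetD s j 0 then (p.1 - PySem.List.pyGetD s j 0, p.2 ++ [j]) else p) (a, [])
-- the index range the window scans for kernel k
def pvRngW (win : String) (n k : Int) : List Int :=
  if win == "backward" then PySem.List.pyRange (n - 1 - k) (-1) (-1) else PySem.List.pyRange 0 (n - k) 1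
-- the deficit list, in kernel order
def pvDs (mr n : Int) (s : List Int) (win : String) : List Int :=
  (List.range n.toNat).map (fun (i : Nat) => pvNeedIdx s mr (pvRngW win n (i : Int)))
-- the common closed form both ports reduce to
def pvClosed (mr n : Int) (s : List Int) (win : String) : Int × List Int × Int :=
  let ds := pvDs mr n s win
  let m := (PySem.List.min? ds (fun x => x)).getD 0
  let idx := (PySem.List.index? ds m).getD 0
  let opt := (pvPairB s mr (pvRngW win n (idx : Int))).2.reverse
  ((opt.length : Int), opt, m)

-- A's condition 'need - x >= 0' is B's 'need >= x'
lemma pv_pair_swap (s : List Int) :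
    (fun (p : Int × List Int) j => if p.1 - PySem.List.pyGetD s j 0 ≥ 0 then (p.1 - PySem.List.pyGetD s j 0, p.2 ++ [j]) else p)
      = (fun (p : Int × List Int) j => if p.1 ≥ PySem.List.pyGetD s j 0 then (p.1 - PySem.List.pyGetD s j 0, p.2 ++ [j]) else p) := by
  funext p j
  simp [ge_iff_le]

-- first component of the pair fold is the need-only fold
lemma pv_fst_pair (s : List Int) :
    ∀ (rng : List Int) (a : Int) (cs : List Int),
      ((rng.foldl (fun (p : Int × List Int) j =>
          if p.1 ≥ PySem.List.pyGetD s j 0 then (p.1 - PySem.List.pyGetD s j 0, p.2 ++ [j]) else p) (a, cs)).1)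
        = pvNeedIdx s a rng := by
  intro rng
  induction rng with
  | nil => intro a cs; simp [pvNeedIdx]
  | cons j t ih =>
      intro a cs
      simp only [pvNeedIdx, List.foldl_cons] at *
      by_cases h : a ≥ PySem.List.pyGetD s j 0 <;> simp [h, ih]

-- characterization of A's outer loop (body ignores the loop variable)
lemma pv_loop_char {β : Type} (inner : Int → Int × List Int) (l : List β) :
    l.foldl (fun (st : Int × List (List Int) × List Int) _ =>
        (st.1 + 1, st.2.1 ++ [(inner st.1).2], st.2.2 ++ [(inner st.1).1])) (0, [], [])
      = ((l.length : Int),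
         (List.range l.length).map (fun (i : Nat) => (inner (i : Int)).2),
         (List.range l.length).map (fun (i : Nat) => (inner (i : Int)).1)) := by
  suffices h : ∀ (l : List β) (k0 : Int) (cs : List (List Int)) (ds : List Int),
      l.foldl (fun (st : Int × List (List Int) × List Int) _ =>
        (st.1 + 1, st.2.1 ++ [(inner st.1).2], st.2.2 ++ [(inner st.1).1])) (k0, cs, ds)
      = (k0 + (l.length : Int),
         cs ++ (List.range l.length).map (fun (i : Nat) => (inner (k0 + (i : Int))).2),
         ds ++ (List.range l.length).map (fun (i : Nat) => (inner (k0 + (i : Int))).1)) by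
    simpa using h l 0 [] []
  intro l
  induction l with
  | nil => intro k0 cs ds; simp
  | cons x t ih =>
      intro k0 cs ds
      simp only [List.foldl_cons, ih, List.length_cons, Prod.mk.injEq]
      refine ⟨by push_cast; ring, ?_, ?_⟩ <;>
      · rw [List.range_succ_eq_map]
        simp only [List.map_cons, List.map_map, List.append_assoc, List.cons_append,
          List.nil_append, Nat.cast_zero, Int.add_zero]
        congr 1
        congr 1
        apply List.map_congr_left
        intro i _
        simp only [Function.comp]
        congr 2
        push_cast
        ring

-- the need-only fold over range(m) is the value fold over the m-prefix
lemma pv_idx_take (s : List Int) (a m : Int) (h0 : 0 ≤ m) (hm : m ≤ (s.length : Int)) :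
    pvNeedIdx s a (PySem.List.pyRange 0 m 1) = pvNeedVal a (s.take m.toNat) := by
  have hlen : ((s.take m.toNat).length : Int) = m := by simp; omega
  rw [pvNeedVal, ← PySem.List.foldl_pyRange_zero_pyGetD' (s.take m.toNat) 0
      (fun nd x => if nd ≥ x then nd - x else nd) a, hlen, pvNeedIdx]
  apply List.foldl_ext
  intro b j hj
  rw [PySem.List.mem_pyRange_one] at hj
  have e1 : PySem.List.pyGetD (s.take m.toNat) j 0 = PySem.List.pyGetD s j 0 := by
    rw [PySem.List.pyGetD_eq_getElem _ _ hj.1 (by rw [hlen]; exact hj.2),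
        PySem.List.pyGetD_eq_getElem _ _ hj.1 (by omega)]
    exact List.getElem_take
  simp only [e1]

-- characterization of B's accumulating prefix scan
lemma pv_scan :
    ∀ (l : List Int) (a : Int) (cs : List Int),
      l.foldl (fun (st : List Int × Int) x =>
          (st.1 ++ [if st.2 ≥ x then st.2 - x else st.2], if st.2 ≥ x then st.2 - x else st.2)) (cs ++ [a], a)
        = (cs ++ (List.range (l.length + 1)).map (fun (t : Nat) => pvNeedVal a (l.take t)), pvNeedVal a l) := by
  intro l
  induction l with
  | nil => intro a cs; simp [pvNeedVal]
  | cons x t ih =>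
      intro a cs
      simp only [List.foldl_cons]
      have hstep : pvNeedVal a (x :: t) = pvNeedVal (if a ≥ x then a - x else a) t := by
        simp [pvNeedVal]
      rw [ih (if a ≥ x then a - x else a) (cs ++ [a])]
      simp only [Prod.mk.injEq, List.length_cons]
      refine ⟨?_, by rw [hstep]⟩
      conv_rhs => rw [List.range_succ_eq_map]
      simp only [List.map_cons, List.map_map, List.append_assoc, List.cons_append,
        List.nil_append, List.take_zero, pvNeedVal, List.foldl_nil]
      congr 2

lemma pv_scan0 (l : List Int) (a : Int) :
    l.foldl (fun (st : List Int × Int) x =>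
        (st.1 ++ [if st.2 ≥ x then st.2 - x else st.2], if st.2 ≥ x then st.2 - x else st.2)) ([a], a)
      = ((List.range (l.length + 1)).map (fun (t : Nat) => pvNeedVal a (l.take t)), pvNeedVal a l) := by
  simpa using pv_scan l a []

lemma pv_ds_len (mr n : Int) (s : List Int) (win : String) : (pvDs mr n s win).length = n.toNat := by
  simp [pvDs]

lemma pv_idx_lt (ds : List Int) (hne : ds ≠ []) :
    (PySem.List.index? ds ((PySem.List.min? ds (fun x => x)).getD 0)).getD 0 < ds.length := by
  obtain ⟨m0, hm0⟩ : ∃ m0, PySem.List.min? ds (fun x => x) = some m0 := by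
    cases h : PySem.List.min? ds (fun x => x) with
    | none => exact absurd ((PySem.List.min?_eq_none_iff ds _).mp h) hne
    | some m0 => exact ⟨m0, rfl⟩
  rw [hm0, Option.getD_some]
  have hmem := PySem.List.min?_mem hm0
  obtain ⟨i0, hi0⟩ := Option.isSome_iff_exists.mp ((PySem.List.index?_isSome_iff ds m0).mpr hmem)
  rw [hi0, Option.getD_some]
  obtain ⟨hk, -⟩ := PySem.List.getElem_of_index?_eq_some hi0
  exact hk

lemma pv_getD_map (N : Nat) (C : Nat → List Int) (idx : Nat) (hidx : idx < N) :
    PySem.List.pyGetD ((List.range N).map C) (idx : Int) [] = C idx := by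
  rw [PySem.List.pyGetD_natCast, List.getD_eq_getElem _ _ (by simpa using hidx)]
  simp

-- A reduces to the closed form (h2 is not needed on the A side)
lemma pv_A_closed (mr n : Int) (s : List Int) (dir win : String) (h1 : 1 ≤ n) :
    calculate mr n s dir win = pvClosed mr n s win := by
  have hlenF : (PySem.List.pyRange 0 n 1).length = n.toNat := by
    rw [PySem.List.length_pyRange_one]; congr 1; omega
  have hlenB : (PySem.List.pyRange (n - 1) (-1) (-1)).length = n.toNat := by
    rw [PySem.List.length_pyRange_neg_one]; congr 1; omega
  have hne : pvDs mr n s win ≠ [] := by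
    intro h
    have := pv_ds_len mr n s win
    rw [h] at this
    simp at this
    omega
  have hidx := pv_idx_lt (pvDs mr n s win) hne
  rw [pv_ds_len] at hidx
  simp only [calculate, pvClosed, pv_pair_swap s]
  split_ifs with hd hw hw <;>
  [ (have hc := pv_loop_char (fun k => (PySem.List.pyRange (n - 1 - k) (-1) (-1)).foldl
      (fun (p : Int × List Int) j => if p.1 ≥ PySem.List.pyGetD s j 0 then
        (p.1 - PySem.List.pyGetD s j 0, p.2 ++ [j]) else p) (mr, []))
      (PySem.List.pyRange (n - 1) (-1) (-1));
     beta_reduce at hc; rw [hc, hlenB]);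
    (have hc := pv_loop_char (fun k => (PySem.List.pyRange 0 (n - k) 1).foldl
      (fun (p : Int × List Int) j => if p.1 ≥ PySem.List.pyGetD s j 0 then
        (p.1 - PySem.List.pyGetD s j 0, p.2 ++ [j]) else p) (mr, []))
      (PySem.List.pyRange (n - 1) (-1) (-1));
     beta_reduce at hc; rw [hc, hlenB]);
    (have hc := pv_loop_char (fun k => (PySem.List.pyRange (n - 1 - k) (-1) (-1)).foldl
      (fun (p : Int × List Int) j => if p.1 ≥ PySem.List.pyGetD s j 0 then
        (p.1 - PySem.List.pyGetD s j 0, p.2 ++ [j]) else p) (mr, []))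
      (PySem.List.pyRange 0 n 1);
     beta_reduce at hc; rw [hc, hlenF]);
    (have hc := pv_loop_char (fun k => (PySem.List.pyRange 0 (n - k) 1).foldl
      (fun (p : Int × List Int) j => if p.1 ≥ PySem.List.pyGetD s j 0 then
        (p.1 - PySem.List.pyGetD s j 0, p.2 ++ [j]) else p) (mr, []))
      (PySem.List.pyRange 0 n 1);
     beta_reduce at hc; rw [hc, hlenF]) ] <;>
  all_goals dsimp only
  · (have hdef : List.map (fun (i : Nat) =>
        (List.foldl (fun p j => if p.1 ≥ PySem.List.pyGetD s j 0 then (p.1 - PySem.List.pyGetD s j 0, p.2 ++ [j]) else p)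
          ((mr : Int), ([] : List Int)) (PySem.List.pyRange (n - 1 - (i : Int)) (-1) (-1))).1) (List.range n.toNat) = pvDs mr n s win := by
      (unfold pvDs;
       apply List.map_congr_left;
       intro i _;
       rw [pv_fst_pair];
       simp [pvRngW, hw]);
     rw [hdef, pv_getD_map n.toNat _ _ hidx];
     simp [pvPairB, pvRngW, hw])
  · (have hdef : List.map (fun (i : Nat) =>
        (List.foldl (fun p j => if p.1 ≥ PySem.List.pyGetD s j 0 then (p.1 - PySem.List.pyGetD s j 0, p.2 ++ [j]) else p)
          ((mr : Int), ([] : List Int)) (PySem.List.pyRange 0 (n - (i : Int)) 1)).1) (List.range n.toNat) = pvDs mr n s win := by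
      (unfold pvDs;
       apply List.map_congr_left;
       intro i _;
       rw [pv_fst_pair];
       simp [pvRngW, hw]);
     rw [hdef, pv_getD_map n.toNat _ _ hidx];
     simp [pvPairB, pvRngW, hw])
  · (have hdef : List.map (fun (i : Nat) =>
        (List.foldl (fun p j => if p.1 ≥ PySem.List.pyGetD s j 0 then (p.1 - PySem.List.pyGetD s j 0, p.2 ++ [j]) else p)
          ((mr : Int), ([] : List Int)) (PySem.List.pyRange (n - 1 - (i : Int)) (-1) (-1))).1) (List.range n.toNat) = pvDs mr n s win := by
      (unfold pvDs;
       apply List.map_congr_left;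
       intro i _;
       rw [pv_fst_pair];
       simp [pvRngW, hw]);
     rw [hdef, pv_getD_map n.toNat _ _ hidx];
     simp [pvPairB, pvRngW, hw])
  · (have hdef : List.map (fun (i : Nat) =>
        (List.foldl (fun p j => if p.1 ≥ PySem.List.pyGetD s j 0 then (p.1 - PySem.List.pyGetD s j 0, p.2 ++ [j]) else p)
          ((mr : Int), ([] : List Int)) (PySem.List.pyRange 0 (n - (i : Int)) 1)).1) (List.range n.toNat) = pvDs mr n s win := by
      (unfold pvDs;
       apply List.map_congr_left;
       intro i _;
       rw [pv_fst_pair];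
       simp [pvRngW, hw]);
     rw [hdef, pv_getD_map n.toNat _ _ hidx];
     simp [pvPairB, pvRngW, hw])

-- B reduces to the same closed form
lemma pv_B_closed (mr n : Int) (s : List Int) (dir win : String)
    (h1 : 1 ≤ n) (h2 : n ≤ (s.length : Int)) :
    calculate_alt mr n s dir win = pvClosed mr n s win := by
  simp only [calculate_alt, pvClosed]
  split_ifs with hw
  · -- backward window
    have hdef : (PySem.List.pyRange 0 n 1).map (fun k =>
        (PySem.List.pyRange (n - 1 - k) (-1) (-1)).foldl
          (fun need j => if need ≥ PySem.List.pyGetD s j 0 then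
            need - PySem.List.pyGetD s j 0 else need) mr) = pvDs mr n s win := by
      unfold pvDs
      rw [PySem.List.pyRange_one, List.map_map]
      have hsz : (n - 0).toNat = n.toNat := by omega
      rw [hsz]
      apply List.map_congr_left
      intro i _
      simp [Function.comp, pvNeedIdx, pvRngW, hw]
    rw [hdef]
    simp [pvPairB, pvRngW, hw]
  · -- forward window: one accumulating prefix scan
    have h0n : (0 : Int) ≤ n := by omega
    rw [PySem.List.slice_to s h0n, pv_scan0 (s.take n.toNat) mr]
    have hlt : (s.take n.toNat).length = n.toNat := by simp; omega
    rw [hlt]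
    have hdef : (PySem.List.pyRange 0 n 1).map (fun k =>
        PySem.List.pyGetD ((List.range (n.toNat + 1)).map
          (fun (t : Nat) => pvNeedVal mr ((s.take n.toNat).take t))) (n - k) 0)
        = pvDs mr n s win := by
      unfold pvDs
      rw [PySem.List.pyRange_one, List.map_map]
      have hsz : (n - 0).toNat = n.toNat := by omega
      rw [hsz]
      apply List.map_congr_left
      intro i hi
      rw [List.mem_range] at hi
      simp only [Function.comp, zero_add]
      have hb0 : (0 : Int) ≤ n - (i : Int) := by omega
      have hb1 : n - (i : Int) < ((List.range (n.toNat + 1)).map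
          (fun (t : Nat) => pvNeedVal mr ((s.take n.toNat).take t))).length := by
        simp only [List.length_map, List.length_range]; push_cast; omega
      rw [PySem.List.pyGetD_eq_getElem _ _ hb0 hb1]
      have hb2 : (n - (i : Int)).toNat < n.toNat + 1 := by omega
      rw [List.getElem_map, List.getElem_range]
      rw [List.take_take]
      have hmin : min (n - (i : Int)).toNat n.toNat = (n - (i : Int)).toNat := by omega
      rw [hmin]
      rw [← pv_idx_take s mr (n - (i : Int)) hb0 (by omega)]
      simp [pvRngW, hw]
    rw [hdef]
    simp [pvPairB, pvRngW, hw]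



-- ===== VERDICT (by name: the statement is the Claim_ definition above) =====
theorem calculate_spec : Claim_equal_calculate := by
  intro mr n s dir win _ hpre
  unfold Spec_calculate
  exact (pv_A_closed mr n s dir win hpre.1).trans (pv_B_closed mr n s dir win hpre.1 hpre.2).symm
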